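-- pv_equiv track=rewrite | github.com/wrwr55/Salesforce-AI-Case-Mapper | maps_ids_for_TESTME2.py | classify_type_subtype_category
-- ===== SOURCE A (Python) =====
-- ALLOWED_TYPES = ['Administrative','App Development','Client Project','Configuration','Configuration Change','CPQ Issues','CSM Issues','Feature Request','Marketing','Miscellaneous Type','New Feature','Problem','Question','Sales Issues','Sales Non-CPQ Related Issues']
--
-- ALLOWED_SUBTYPES = ['ServiceDesk+ App','Credit App','Email Template','SpringCM Project','Salesforce Project','Miscellaneous SubType']
--
-- ALLOWED_CATEGORIES = ['Client Training','System Access','Data Extraction','Planning','Integration','Reporting','Case Management','Stakeholder Management','Client Research','Project Scope','File Management','Data']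
--
-- def classify_type_subtype_category(text: str) -> tuple[str,str,str]:
--     t = text.lower()
--
--     # Type
--     if "cpq" in t:
--         type_value = "CPQ Issues"
--     elif "salesforce" in t:
--         type_value = "Configuration"
--     elif "email template" in t:
--         type_value = "Client Project"
--     elif any(w in t for w in ["bug","issue","error"]):
--         type_value = "Problem"
--     elif "feature request" in t:
--         type_value = "Feature Request"
--     else:
--         type_value = "Miscellaneous Type"
--
--     # Sub-Type
--     if "servicedesk" in t:
--         subtype_value = "ServiceDesk+ App"
--     elif "springcm" in t:
--         subtype_value = "SpringCM Project"
--     elif "salesforce" in t: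
--         subtype_value = "Salesforce Project"
--     elif "credit app" in t:
--         subtype_value = "Credit App"
--     elif "email template" in t:
--         subtype_value = "Email Template"
--     else:
--         subtype_value = "Miscellaneous SubType"
--
--     # Category
--     if "training" in t:
--         category_value = "Client Training"
--     elif any(w in t for w in ["login","sso","access","permission"]):
--         category_value = "System Access"
--     elif "report" in t or "dashboard" in t:
--         category_value = "Reporting"
--     elif "data" in t or "etl" in t or "extract" in t:
--         category_value = "Data Extraction"
--     elif "plan" in t or "scope" in t or "roadmap" in t:
--         category_value = "Planning"
--     elif "integrat" in t or "api" in t: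
--         category_value = "Integration"
--     else:
--         category_value = "Case Management"
--
--     # snap to allowed lists
--     if type_value not in ALLOWED_TYPES: type_value = "Miscellaneous Type"
--     if subtype_value not in ALLOWED_SUBTYPES: subtype_value = "Miscellaneous SubType"
--     if category_value not in ALLOWED_CATEGORIES: category_value = "Case Management"
--     return type_value, subtype_value, category_value
-- ===== SOURCE B (Python) =====
-- # B: single-pass multi-pattern scanner. Instead of running ~27 independent
-- # substring searches (three if/elif chains), B walks the lowered text ONCE;
-- # at each position it checks which keywords start there and keeps, per
-- # classification, the best (lowest-priority) matching rule seen so far.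
-- # Priority = rule order in A's chains, so the minimum-priority match equals
-- # A's first-match result.
--
-- # (keyword, classification index, priority, label); grouped by classification,
-- # priorities ascending = the original rule order.
-- FLAT_RULES = [
--     ("cpq", 0, 0, "CPQ Issues"),
--     ("salesforce", 0, 1, "Configuration"),
--     ("email template", 0, 2, "Client Project"),
--     ("bug", 0, 3, "Problem"),
--     ("issue", 0, 3, "Problem"),
--     ("error", 0, 3, "Problem"),
--     ("feature request", 0, 4, "Feature Request"),
--     ("servicedesk", 1, 0, "ServiceDesk+ App"),
--     ("springcm", 1, 1, "SpringCM Project"),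
--     ("salesforce", 1, 2, "Salesforce Project"),
--     ("credit app", 1, 3, "Credit App"),
--     ("email template", 1, 4, "Email Template"),
--     ("training", 2, 0, "Client Training"),
--     ("login", 2, 1, "System Access"),
--     ("sso", 2, 1, "System Access"),
--     ("access", 2, 1, "System Access"),
--     ("permission", 2, 1, "System Access"),
--     ("report", 2, 2, "Reporting"),
--     ("dashboard", 2, 2, "Reporting"),
--     ("data", 2, 3, "Data Extraction"),
--     ("etl", 2, 3, "Data Extraction"),
--     ("extract", 2, 3, "Data Extraction"),
--     ("plan", 2, 4, "Planning"),
--     ("scope", 2, 4, "Planning"),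
--     ("roadmap", 2, 4, "Planning"),
--     ("integrat", 2, 5, "Integration"),
--     ("api", 2, 5, "Integration"),
-- ]
--
-- DEFAULTS = ("Miscellaneous Type", "Miscellaneous SubType", "Case Management")
--
--
-- def classify_type_subtype_category(text: str) -> tuple[str, str, str]:
--     t = text.lower()
--     best = [None, None, None]  # per classification: (priority, label) or None
--     for i in range(len(t)):
--         for kw, cls, prio, label in FLAT_RULES:
--             if t.startswith(kw, i):
--                 b = best[cls]
--                 if b is None or prio < b[0]:
--                     best[cls] = (prio, label)
--     return tuple(b[1] if b is not None else d for b, d in zip(best, DEFAULTS))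
-- ===== Notes on version B (the rewrite author's own statement) =====
-- stated objective: alternative
-- what changed: Replaced three independent if/elif substring-search chains (plus snap-to-allowed-list patch-ups) with a single left-to-right scan of the text that prefix-matches a flat prioritized keyword table at each position and keeps the minimum-priority hit per classification; the minimum priority equals A's first-match rule, and the snap checks vanish because every table label is already allowed.
import Mathlib
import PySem

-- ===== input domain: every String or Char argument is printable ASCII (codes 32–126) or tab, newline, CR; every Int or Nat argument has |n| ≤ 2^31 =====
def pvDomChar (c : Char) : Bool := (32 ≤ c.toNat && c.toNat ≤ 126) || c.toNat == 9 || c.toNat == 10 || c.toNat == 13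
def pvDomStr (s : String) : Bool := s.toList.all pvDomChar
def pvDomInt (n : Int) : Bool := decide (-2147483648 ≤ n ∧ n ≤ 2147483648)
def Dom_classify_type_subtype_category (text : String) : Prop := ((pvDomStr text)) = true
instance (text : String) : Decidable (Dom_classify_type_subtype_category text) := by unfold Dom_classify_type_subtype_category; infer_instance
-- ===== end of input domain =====

-- B replaces three if/elif substring-search chains by ONE left-to-right scan of the text
-- that prefix-matches a flat prioritized keyword table at each position, keeping the
-- minimum-priority hit per classification (objective: alternative; same cost).

-- ===== PORT A =====
def ALLOWED_TYPES : List String := ["Administrative","App Development","Client Project","Configuration","Configuration Change","CPQ Issues","CSM Issues","Feature Request","Marketing","Miscellaneous Type","New Feature","Problem","Question","Sales Issues","Sales Non-CPQ Related Issues"]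
def ALLOWED_SUBTYPES : List String := ["ServiceDesk+ App","Credit App","Email Template","SpringCM Project","Salesforce Project","Miscellaneous SubType"]
def ALLOWED_CATEGORIES : List String := ["Client Training","System Access","Data Extraction","Planning","Integration","Reporting","Case Management","Stakeholder Management","Client Research","Project Scope","File Management","Data"]

def classify_type_subtype_category (text : String) : String × String × String :=
  let t := PySem.Str.lower text
  -- Type
  let type_value :=
    if PySem.Str.isIn "cpq" t then "CPQ Issues"
    else if PySem.Str.isIn "salesforce" t then "Configuration"
    else if PySem.Str.isIn "email template" t then "Client Project"
    else if ["bug","issue","error"].any (fun w => PySem.Str.isIn w t) then "Problem"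
    else if PySem.Str.isIn "feature request" t then "Feature Request"
    else "Miscellaneous Type"
  -- Sub-Type
  let subtype_value :=
    if PySem.Str.isIn "servicedesk" t then "ServiceDesk+ App"
    else if PySem.Str.isIn "springcm" t then "SpringCM Project"
    else if PySem.Str.isIn "salesforce" t then "Salesforce Project"
    else if PySem.Str.isIn "credit app" t then "Credit App"
    else if PySem.Str.isIn "email template" t then "Email Template"
    else "Miscellaneous SubType"
  -- Category
  let category_value :=
    if PySem.Str.isIn "training" t then "Client Training"
    else if ["login","sso","access","permission"].any (fun w => PySem.Str.isIn w t) then "System Access"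
    else if PySem.Str.isIn "report" t || PySem.Str.isIn "dashboard" t then "Reporting"
    else if PySem.Str.isIn "data" t || PySem.Str.isIn "etl" t || PySem.Str.isIn "extract" t then "Data Extraction"
    else if PySem.Str.isIn "plan" t || PySem.Str.isIn "scope" t || PySem.Str.isIn "roadmap" t then "Planning"
    else if PySem.Str.isIn "integrat" t || PySem.Str.isIn "api" t then "Integration"
    else "Case Management"
  -- snap to allowed lists
  let type_value := if ALLOWED_TYPES.contains type_value then type_value else "Miscellaneous Type"
  let subtype_value := if ALLOWED_SUBTYPES.contains subtype_value then subtype_value else "Miscellaneous SubType"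
  let category_value := if ALLOWED_CATEGORIES.contains category_value then category_value else "Case Management"
  (type_value, subtype_value, category_value)

-- ===== PORT B =====
-- (keyword, classification index, priority, label); grouped by classification, priorities ascending.
def FLAT_RULES : List (String × Nat × Nat × String) :=
  [("cpq", 0, 0, "CPQ Issues"),
   ("salesforce", 0, 1, "Configuration"),
   ("email template", 0, 2, "Client Project"),
   ("bug", 0, 3, "Problem"),
   ("issue", 0, 3, "Problem"),
   ("error", 0, 3, "Problem"),
   ("feature request", 0, 4, "Feature Request"),
   ("servicedesk", 1, 0, "ServiceDesk+ App"),
   ("springcm", 1, 1, "SpringCM Project"),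
   ("salesforce", 1, 2, "Salesforce Project"),
   ("credit app", 1, 3, "Credit App"),
   ("email template", 1, 4, "Email Template"),
   ("training", 2, 0, "Client Training"),
   ("login", 2, 1, "System Access"),
   ("sso", 2, 1, "System Access"),
   ("access", 2, 1, "System Access"),
   ("permission", 2, 1, "System Access"),
   ("report", 2, 2, "Reporting"),
   ("dashboard", 2, 2, "Reporting"),
   ("data", 2, 3, "Data Extraction"),
   ("etl", 2, 3, "Data Extraction"),
   ("extract", 2, 3, "Data Extraction"),
   ("plan", 2, 4, "Planning"),
   ("scope", 2, 4, "Planning"),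
   ("roadmap", 2, 4, "Planning"),
   ("integrat", 2, 5, "Integration"),
   ("api", 2, 5, "Integration")]

-- best[cls] update: keep the lower-priority hit ('b is None or prio < b[0]')
def updB (b : Option (Nat × String)) (p : Nat) (l : String) : Option (Nat × String) :=
  match b with
  | none => some (p, l)
  | some (q, m) => if p < q then some (p, l) else some (q, m)

-- one table entry at position i; t.startswith(kw, i) with 0 ≤ i < len t is exactly
-- kw.toList.isPrefixOf (cs.drop i) (hand port of startswith-with-offset; exact here)
def bstep (cs : List Char) (i : Nat) (b : Option (Nat × String) × Option (Nat × String) × Option (Nat × String))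
    (e : String × Nat × Nat × String) :
    Option (Nat × String) × Option (Nat × String) × Option (Nat × String) :=
  if e.1.toList.isPrefixOf (cs.drop i) then
    match e.2.1 with
    | 0 => (updB b.1 e.2.2.1 e.2.2.2, b.2.1, b.2.2)
    | 1 => (b.1, updB b.2.1 e.2.2.1 e.2.2.2, b.2.2)
    | _ => (b.1, b.2.1, updB b.2.2 e.2.2.1 e.2.2.2)
  else b

def labelOr (b : Option (Nat × String)) (d : String) : String :=
  match b with
  | some (_, l) => l
  | none => d

def classify_type_subtype_category_alt (text : String) : String × String × String :=
  let t := PySem.Str.lower text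
  let cs := t.toList
  let best := (List.range cs.length).foldl (fun b i => FLAT_RULES.foldl (bstep cs i) b) (none, none, none)
  (labelOr best.1 "Miscellaneous Type", labelOr best.2.1 "Miscellaneous SubType", labelOr best.2.2 "Case Management")

-- ===== PRECONDITION & SPEC =====
def Spec_classify_type_subtype_category (text : String) (out : String × String × String) : Prop := out = classify_type_subtype_category_alt text
instance (text : String) (out : String × String × String) : Decidable (Spec_classify_type_subtype_category text out) := by unfold Spec_classify_type_subtype_category; infer_instance

-- ===== CLAIM (what is proved, stated in full; the proofs are below) =====
def Claim_equal_classify_type_subtype_category : Prop := ∀ (text : String), Dom_classify_type_subtype_category text → Spec_classify_type_subtype_category text (classify_type_subtype_category text)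

-- ===== LEMMAS AND PROOFS =====
set_option maxHeartbeats 1000000

-- grouped view of the rules, used only by the proof
def TGROUP : List (List String × Nat × String) :=
  [(["cpq"], 0, "CPQ Issues"), (["salesforce"], 1, "Configuration"), (["email template"], 2, "Client Project"),
   (["bug","issue","error"], 3, "Problem"), (["feature request"], 4, "Feature Request")]
def SGROUP : List (List String × Nat × String) :=
  [(["servicedesk"], 0, "ServiceDesk+ App"), (["springcm"], 1, "SpringCM Project"), (["salesforce"], 2, "Salesforce Project"),
   (["credit app"], 3, "Credit App"), (["email template"], 4, "Email Template")]
def CGROUP : List (List String × Nat × String) :=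
  [(["training"], 0, "Client Training"), (["login","sso","access","permission"], 1, "System Access"),
   (["report","dashboard"], 2, "Reporting"), (["data","etl","extract"], 3, "Data Extraction"),
   (["plan","scope","roadmap"], 4, "Planning"), (["integrat","api"], 5, "Integration")]

def chainR (cs : List Char) (i : Nat) (o : Option (Nat × String)) : List (List String × Nat × String) → Option (Nat × String)
  | [] => o
  | r :: rest => chainR cs i (if r.1.any (fun kw => kw.toList.isPrefixOf (cs.drop i)) then updB o r.2.1 r.2.2 else o) rest

def occB (cs : List Char) (n : Nat) (kw : String) : Bool :=
  (List.range n).any (fun i => kw.toList.isPrefixOf (cs.drop i))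

def chooseR (cs : List Char) (n : Nat) : List (List String × Nat × String) → Option (Nat × String)
  | [] => none
  | r :: rest => if r.1.any (occB cs n) then some (r.2.1, r.2.2) else chooseR cs n rest

theorem updB_updB (o : Option (Nat × String)) (p : Nat) (l : String) : updB (updB o p l) p l = updB o p l := by
  rcases o with _ | ⟨q, m⟩ <;> simp [updB] <;> split_ifs <;> simp [updB, *]

theorem merge2 (c1 c2 : Bool) (o : Option (Nat × String)) (p : Nat) (l : String) :
    (if c2 then updB (if c1 then updB o p l else o) p l else (if c1 then updB o p l else o))
      = if c1 || c2 then updB o p l else o := by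
  cases c1 <;> cases c2 <;> simp [updB_updB]

theorem bstep0 (cs : List Char) (i : Nat) (b : Option (Nat × String) × Option (Nat × String) × Option (Nat × String))
    (kw : String) (p : Nat) (l : String) :
    bstep cs i b (kw, 0, p, l) = ((if kw.toList.isPrefixOf (cs.drop i) then updB b.1 p l else b.1), b.2.1, b.2.2) := by
  unfold bstep; split_ifs <;> rfl

theorem bstep1 (cs : List Char) (i : Nat) (b : Option (Nat × String) × Option (Nat × String) × Option (Nat × String))
    (kw : String) (p : Nat) (l : String) :
    bstep cs i b (kw, 1, p, l) = (b.1, (if kw.toList.isPrefixOf (cs.drop i) then updB b.2.1 p l else b.2.1), b.2.2) := by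
  unfold bstep; split_ifs <;> rfl

theorem bstep2 (cs : List Char) (i : Nat) (b : Option (Nat × String) × Option (Nat × String) × Option (Nat × String))
    (kw : String) (p : Nat) (l : String) :
    bstep cs i b (kw, 2, p, l) = (b.1, b.2.1, (if kw.toList.isPrefixOf (cs.drop i) then updB b.2.2 p l else b.2.2)) := by
  unfold bstep; split_ifs <;> rfl

theorem flat_fold (cs : List Char) (i : Nat)
    (b : Option (Nat × String) × Option (Nat × String) × Option (Nat × String)) :
    FLAT_RULES.foldl (bstep cs i) b = (chainR cs i b.1 TGROUP, chainR cs i b.2.1 SGROUP, chainR cs i b.2.2 CGROUP) := by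
  obtain ⟨b1, b2, b3⟩ := b
  simp only [FLAT_RULES, List.foldl_cons, List.foldl_nil, bstep0, bstep1, bstep2,
    TGROUP, SGROUP, CGROUP, chainR, List.any_cons, List.any_nil, Bool.or_false, merge2, Bool.or_assoc]

theorem foldl_triple (cs : List Char) (l : List Nat)
    (a b c : Option (Nat × String)) :
    l.foldl (fun s i => (chainR cs i s.1 TGROUP, chainR cs i s.2.1 SGROUP, chainR cs i s.2.2 CGROUP)) (a, b, c)
      = (l.foldl (fun o i => chainR cs i o TGROUP) a,
         l.foldl (fun o i => chainR cs i o SGROUP) b,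
         l.foldl (fun o i => chainR cs i o CGROUP) c) := by
  induction l generalizing a b c with
  | nil => rfl
  | cons x xs ih => simpa using ih _ _ _

theorem chain_absorb (cs : List Char) (n : Nat) (p : Nat) (l : String)
    (rs : List (List String × Nat × String)) (h : ∀ r ∈ rs, p < r.2.1) :
    chainR cs n (some (p, l)) rs = some (p, l) := by
  induction rs with
  | nil => rfl
  | cons r rest ih =>
    have hp := h r (List.mem_cons_self ..)
    have : (if r.1.any (fun kw => kw.toList.isPrefixOf (cs.drop n)) then updB (some (p, l)) r.2.1 r.2.2 else some (p, l)) = some (p, l) := by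
      split_ifs <;> simp [updB, Nat.lt_asymm hp, Nat.not_lt_of_lt hp]
    rw [chainR, this]
    exact ih fun r hr => h r (List.mem_cons_of_mem _ hr)

theorem choose_mem (cs : List Char) (n : Nat) (rs : List (List String × Nat × String))
    (q : Nat) (m : String) (h : chooseR cs n rs = some (q, m)) : ∃ r ∈ rs, r.2.1 = q := by
  induction rs with
  | nil => simp [chooseR] at h
  | cons r rest ih =>
    rw [chooseR] at h
    split_ifs at h with hc
    · exact ⟨r, List.mem_cons_self .., by injection h with h'; exact congrArg Prod.fst h'⟩
    · obtain ⟨r', hr', hq⟩ := ih h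
      exact ⟨r', List.mem_cons_of_mem _ hr', hq⟩

theorem occ_succ (cs : List Char) (n : Nat) (kw : String) :
    occB cs (n + 1) kw = (occB cs n kw || kw.toList.isPrefixOf (cs.drop n)) := by
  simp [occB, List.range_succ]

theorem any_occ_succ (cs : List Char) (n : Nat) (kws : List String) :
    kws.any (occB cs (n + 1)) = (kws.any (occB cs n) || kws.any (fun kw => kw.toList.isPrefixOf (cs.drop n))) := by
  induction kws with
  | nil => rfl
  | cons k ks ih =>
    simp only [List.any_cons, ih, occ_succ]
    cases occB cs n k <;> cases (k.toList.isPrefixOf (cs.drop n)) <;> simp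

theorem chain_choose (cs : List Char) (n : Nat) (rs : List (List String × Nat × String))
    (hs : rs.Pairwise (fun a b => a.2.1 < b.2.1)) :
    chainR cs n (chooseR cs n rs) rs = chooseR cs (n + 1) rs := by
  induction rs with
  | nil => rfl
  | cons r rest ih =>
    rw [List.pairwise_cons] at hs
    obtain ⟨hlt, hrest⟩ := hs
    by_cases holdr : r.1.any (occB cs n) = true
    · have hL : chooseR cs n (r :: rest) = some (r.2.1, r.2.2) := by rw [chooseR, if_pos holdr]
      have hR : chooseR cs (n + 1) (r :: rest) = some (r.2.1, r.2.2) := by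
        rw [chooseR, if_pos (by simp only [any_occ_succ, holdr, Bool.true_or])]
      rw [hL, hR, chainR]
      have harg : (if (r.1.any fun kw => kw.toList.isPrefixOf (List.drop n cs)) = true
          then updB (some (r.2.1, r.2.2)) r.2.1 r.2.2 else some (r.2.1, r.2.2)) = some (r.2.1, r.2.2) := by
        split_ifs <;> simp [updB]
      rw [harg]
      exact chain_absorb cs n _ _ rest hlt
    · have hL : chooseR cs n (r :: rest) = chooseR cs n rest := by rw [chooseR, if_neg holdr]
      by_cases hhit : (r.1.any fun kw => kw.toList.isPrefixOf (List.drop n cs)) = true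
      · have hR : chooseR cs (n + 1) (r :: rest) = some (r.2.1, r.2.2) := by
          rw [chooseR, if_pos (by simp only [any_occ_succ, hhit, Bool.or_true])]
        have h1 : updB (chooseR cs n rest) r.2.1 r.2.2 = some (r.2.1, r.2.2) := by
          rcases hE : chooseR cs n rest with _ | ⟨q, m⟩
          · simp [updB]
          · obtain ⟨r', hr', hq⟩ := choose_mem cs n rest q m hE
            simp [updB, hq ▸ hlt r' hr']
        rw [hL, hR, chainR, if_pos hhit, h1]
        exact chain_absorb cs n _ _ rest hlt
      · have hR : chooseR cs (n + 1) (r :: rest) = chooseR cs (n + 1) rest := by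
          rw [chooseR, if_neg (by simp [any_occ_succ, holdr, hhit])]
        rw [hL, hR, chainR, if_neg hhit]
        exact ih hrest

theorem choose_zero (cs : List Char) (rs : List (List String × Nat × String)) :
    chooseR cs 0 rs = none := by
  induction rs with
  | nil => rfl
  | cons r rest ih => simp [chooseR, occB, ih]

theorem fold_choose (cs : List Char) (rs : List (List String × Nat × String))
    (hs : rs.Pairwise (fun a b => a.2.1 < b.2.1)) (n : Nat) :
    (List.range n).foldl (fun o i => chainR cs i o rs) none = chooseR cs n rs := by
  induction n with
  | zero => simp [choose_zero]
  | succ k ih => rw [List.range_succ, List.foldl_append, ih]; simpa using chain_choose cs k rs hs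

theorem str_isIn_chars (kw u : String) : PySem.Str.isIn kw u = PySem.Chars.isIn kw.toList u.toList := by
  rw [Bool.eq_iff_iff, PySem.Str.isIn_iff_infix, PySem.Chars.isIn_iff_infix]

theorem occ_str (u kw : String) (h : kw.toList ≠ []) :
    occB u.toList u.toList.length kw = PySem.Str.isIn kw u := by
  rw [str_isIn_chars, Bool.eq_iff_iff]
  rw [← PySem.Chars.exists_prefix_drop_iff_isIn]
  simp only [occB, List.any_eq_true, List.mem_range, List.isPrefixOf_iff_prefix]
  constructor
  · rintro ⟨i, _, hp⟩; exact ⟨i, hp⟩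
  · rintro ⟨i, hp⟩
    by_cases hi : i < u.toList.length
    · exact ⟨i, hi, hp⟩
    · exfalso
      rw [List.drop_eq_nil_of_le (Nat.le_of_not_lt hi)] at hp
      exact h (List.prefix_nil.mp hp)

theorem type_eq (t : String) :
    labelOr (chooseR t.toList t.toList.length TGROUP) "Miscellaneous Type"
      = (let v :=
          if PySem.Str.isIn "cpq" t then "CPQ Issues"
          else if PySem.Str.isIn "salesforce" t then "Configuration"
          else if PySem.Str.isIn "email template" t then "Client Project"
          else if ["bug","issue","error"].any (fun w => PySem.Str.isIn w t) then "Problem"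
          else if PySem.Str.isIn "feature request" t then "Feature Request"
          else "Miscellaneous Type"
         if ALLOWED_TYPES.contains v then v else "Miscellaneous Type") := by
  simp only [TGROUP, chooseR, List.any_cons, List.any_nil, Bool.or_false]
  rw [occ_str t "cpq" (by decide), occ_str t "salesforce" (by decide), occ_str t "email template" (by decide), occ_str t "bug" (by decide), occ_str t "issue" (by decide), occ_str t "error" (by decide), occ_str t "feature request" (by decide)]
  split_ifs <;> simp_all [labelOr, ALLOWED_TYPES]

theorem subtype_eq (t : String) :
    labelOr (chooseR t.toList t.toList.length SGROUP) "Miscellaneous SubType"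
      = (let v :=
          if PySem.Str.isIn "servicedesk" t then "ServiceDesk+ App"
          else if PySem.Str.isIn "springcm" t then "SpringCM Project"
          else if PySem.Str.isIn "salesforce" t then "Salesforce Project"
          else if PySem.Str.isIn "credit app" t then "Credit App"
          else if PySem.Str.isIn "email template" t then "Email Template"
          else "Miscellaneous SubType"
         if ALLOWED_SUBTYPES.contains v then v else "Miscellaneous SubType") := by
  simp only [SGROUP, chooseR, List.any_cons, List.any_nil, Bool.or_false]
  rw [occ_str t "servicedesk" (by decide), occ_str t "springcm" (by decide), occ_str t "salesforce" (by decide), occ_str t "credit app" (by decide), occ_str t "email template" (by decide)]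
  split_ifs <;> simp_all [labelOr, ALLOWED_SUBTYPES]

theorem category_eq (t : String) :
    labelOr (chooseR t.toList t.toList.length CGROUP) "Case Management"
      = (let v :=
          if PySem.Str.isIn "training" t then "Client Training"
          else if ["login","sso","access","permission"].any (fun w => PySem.Str.isIn w t) then "System Access"
          else if PySem.Str.isIn "report" t || PySem.Str.isIn "dashboard" t then "Reporting"
          else if PySem.Str.isIn "data" t || PySem.Str.isIn "etl" t || PySem.Str.isIn "extract" t then "Data Extraction"
          else if PySem.Str.isIn "plan" t || PySem.Str.isIn "scope" t || PySem.Str.isIn "roadmap" t then "Planning"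
          else if PySem.Str.isIn "integrat" t || PySem.Str.isIn "api" t then "Integration"
          else "Case Management"
         if ALLOWED_CATEGORIES.contains v then v else "Case Management") := by
  simp only [CGROUP, chooseR, List.any_cons, List.any_nil, Bool.or_false, Bool.or_assoc]
  rw [occ_str t "training" (by decide), occ_str t "login" (by decide), occ_str t "sso" (by decide), occ_str t "access" (by decide), occ_str t "permission" (by decide), occ_str t "report" (by decide), occ_str t "dashboard" (by decide), occ_str t "data" (by decide), occ_str t "etl" (by decide), occ_str t "extract" (by decide), occ_str t "plan" (by decide), occ_str t "scope" (by decide), occ_str t "roadmap" (by decide), occ_str t "integrat" (by decide), occ_str t "api" (by decide)]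
  split_ifs <;> simp_all [labelOr, ALLOWED_CATEGORIES]

-- ===== VERDICT (by name: the statement is the Claim_ definition above) =====
theorem classify_type_subtype_category_spec : Claim_equal_classify_type_subtype_category := by
  intro text _
  unfold Spec_classify_type_subtype_category
  unfold classify_type_subtype_category classify_type_subtype_category_alt
  simp only [flat_fold, foldl_triple,
    fold_choose _ TGROUP (by decide), fold_choose _ SGROUP (by decide), fold_choose _ CGROUP (by decide)]
  simp only [type_eq, subtype_eq, category_eq]
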